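-- pv_equiv track=rewrite | github.com/sschott20/Competitive-Programming | Pinely Round 3 (Div. 1 + Div. 2)/A.py | solve
-- ===== SOURCE A (Python) =====
-- def solve(test):
--     top, left, bottom, right = 0, 0, 0, 0
--     for point in test:
--         x = point[0]
--         y = point[1]
--         if x > 0:
--             right += 1
--         elif x < 0:
--             left += 1
--         if y > 0:
--             top += 1
--         elif y < 0:
--             bottom += 1
--     if top == 0 or bottom == 0 or left == 0 or right == 0:
--         return "YES"
--     return "NO"
-- ===== SOURCE B (Python) =====
-- def solve(test):
--     has_right = any(x > 0 for x, y in test)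
--     has_left = any(x < 0 for x, y in test)
--     has_top = any(y > 0 for x, y in test)
--     has_bottom = any(y < 0 for x, y in test)
--     if not has_top or not has_bottom or not has_left or not has_right:
--         return "YES"
--     return "NO"
-- ===== Notes on version B (the rewrite author's own statement) =====
-- stated objective: simpler
-- what changed: Replaces the four running counters with four boolean existence checks (any over each sign condition); no counts are maintained, only whether each side is occupied.
import Mathlib
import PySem

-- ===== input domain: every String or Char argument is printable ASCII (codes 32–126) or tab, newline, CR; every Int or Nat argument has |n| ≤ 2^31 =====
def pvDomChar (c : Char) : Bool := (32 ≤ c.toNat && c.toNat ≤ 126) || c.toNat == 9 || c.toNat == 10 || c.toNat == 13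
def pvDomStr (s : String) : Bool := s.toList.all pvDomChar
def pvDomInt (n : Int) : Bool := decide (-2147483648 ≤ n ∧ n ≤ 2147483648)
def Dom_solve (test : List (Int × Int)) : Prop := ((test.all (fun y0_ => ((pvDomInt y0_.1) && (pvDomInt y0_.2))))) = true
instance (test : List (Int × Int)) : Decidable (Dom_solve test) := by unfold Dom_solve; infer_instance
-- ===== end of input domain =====

-- ===== PORT A =====
-- B replaces the four counters with four boolean existence scans; same O(n), simpler.
def solveStep (s : Int × Int × Int × Int) (point : Int × Int) : Int × Int × Int × Int :=
  let x := point.1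
  let y := point.2
  let top := s.1; let left := s.2.1; let bottom := s.2.2.1; let right := s.2.2.2
  let (left, right) := if x > 0 then (left, right + 1) else if x < 0 then (left + 1, right) else (left, right)
  let (top, bottom) := if y > 0 then (top + 1, bottom) else if y < 0 then (top, bottom + 1) else (top, bottom)
  (top, left, bottom, right)

def solve (test : List (Int × Int)) : String :=
  let s := test.foldl solveStep (0, 0, 0, 0)
  if s.1 = 0 ∨ s.2.2.1 = 0 ∨ s.2.1 = 0 ∨ s.2.2.2 = 0 then "YES" else "NO"

-- ===== PORT B =====
def solve_alt (test : List (Int × Int)) : String :=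
  let has_right := test.any (fun p => p.1 > 0)
  let has_left := test.any (fun p => p.1 < 0)
  let has_top := test.any (fun p => p.2 > 0)
  let has_bottom := test.any (fun p => p.2 < 0)
  if !has_top || !has_bottom || !has_left || !has_right then "YES" else "NO"

-- ===== PRECONDITION & SPEC =====
def Spec_solve (test : List (Int × Int)) (out : String) : Prop := out = solve_alt test
instance (test : List (Int × Int)) (out : String) : Decidable (Spec_solve test out) := by unfold Spec_solve; infer_instance

-- ===== CLAIM (what is proved, stated in full; the proofs are below) =====
def Claim_equal_solve : Prop := ∀ (test : List (Int × Int)), Dom_solve test → Spec_solve test (solve test)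

-- ===== LEMMAS AND PROOFS =====

-- ===== VERDICT (by name: the statement is the Claim_ definition above) =====
lemma step_eq (t l b r x y : Int) :
    solveStep (t, l, b, r) (x, y) =
      (t + (if 0 < y then 1 else 0), l + (if x < 0 then 1 else 0),
       b + (if y < 0 then 1 else 0), r + (if 0 < x then 1 else 0)) := by
  by_cases hx : 0 < x <;> by_cases hx' : x < 0 <;> by_cases hy : 0 < y <;> by_cases hy' : y < 0 <;>
    (try simp [solveStep, hx, hx', hy, hy']) <;> omega

lemma solve_loop_eq (test : List (Int × Int)) (t l b r : Int) :
    test.foldl solveStep (t, l, b, r) =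
      (t + (test.countP (fun p => 0 < p.2) : Int),
       l + (test.countP (fun p => p.1 < 0) : Int),
       b + (test.countP (fun p => p.2 < 0) : Int),
       r + (test.countP (fun p => 0 < p.1) : Int)) := by
  induction test generalizing t l b r with
  | nil => simp
  | cons p ps ih =>
      rcases p with ⟨x, y⟩
      rw [List.foldl_cons, step_eq, ih]
      simp only [List.countP_cons, Prod.mk.injEq, decide_eq_true_eq]
      refine ⟨?_, ?_, ?_, ?_⟩ <;> split_ifs <;> push_cast <;> omega

lemma countP_zero_iff_not_any {α : Type} (l : List α) (p : α → Bool) :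
    ((l.countP p : Int) = 0) ↔ l.any p = false := by
  rw [Int.natCast_eq_zero, List.countP_eq_zero, List.any_eq_false]

theorem solve_spec : Claim_equal_solve := by
  intro test _
  unfold Spec_solve solve solve_alt
  rw [solve_loop_eq]
  simp only [zero_add]
  simp only [Bool.or_eq_true, Bool.not_eq_true', ← countP_zero_iff_not_any]
  split_ifs <;> tauto
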